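-- pv_equiv track=rewrite | github.com/carrdelling/AdventOfCode2016 | day11/gold.py | solve
-- ===== SOURCE A (Python) =====
-- def solve(data):
--
--     # don't care about generators, microchips or their types; just count them
--     machines = [sum(d) for d in data]
--     machines[0] += 4  # elerium and dilithium pairs
--     steps = 0
--
--     # move everything from each floor one space up in each iteration
--     for floor in range(3):
--         steps += 2 * (machines[floor] - 1) - 1
--         machines[floor + 1] += machines[floor]
--         machines[floor] = 0
--
--     return steps
-- ===== SOURCE B (Python) =====
-- def solve(data):
--     # Closed form from unrolling the 3-step cascade: floor f contributes
--     # 2*(cumulative count up to f) - 3, with 4 extra items on floor 0.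
--     m0 = sum(data[0]) + 4
--     m1 = sum(data[1])
--     m2 = sum(data[2])
--     return 2 * (3 * m0 + 2 * m1 + m2) - 9
-- ===== Notes on version B (the rewrite author's own statement) =====
-- stated objective: simpler
-- what changed: Replaces the mutating floor-by-floor move loop by a closed-form weighted sum 2*(3*m0+2*m1+m2)-9 obtained by unrolling the 3-step recurrence.
import Mathlib
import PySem

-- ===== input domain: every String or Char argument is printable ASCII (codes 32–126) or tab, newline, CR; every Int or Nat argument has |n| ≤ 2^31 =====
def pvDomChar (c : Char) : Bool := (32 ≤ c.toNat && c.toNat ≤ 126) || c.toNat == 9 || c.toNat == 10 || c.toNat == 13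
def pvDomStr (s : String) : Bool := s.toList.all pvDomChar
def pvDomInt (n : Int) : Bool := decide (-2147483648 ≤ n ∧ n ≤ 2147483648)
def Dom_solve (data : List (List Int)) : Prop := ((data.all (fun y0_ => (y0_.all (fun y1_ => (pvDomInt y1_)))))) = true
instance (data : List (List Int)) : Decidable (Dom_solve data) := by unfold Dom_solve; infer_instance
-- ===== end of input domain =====

-- B replaces A's mutating move loop by the closed-form weighted sum (objective: simpler);
-- return-value equivalence on inputs with at least 4 floors (A raises IndexError otherwise).

-- ===== PORT A =====
def solve (data : List (List Int)) : Int :=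
  let machines := data.map (fun d => d.foldl (· + ·) 0)
  let machines := machines.set 0 ((PySem.List.pyGet? machines 0).getD 0 + 4)
  let r := (PySem.List.pyRange 0 3 1).foldl (fun (st : List Int × Int) floor =>
    let ms := st.1
    let steps := st.2 + 2 * ((PySem.List.pyGet? ms floor).getD 0 - 1) - 1
    let ms := ms.set (floor + 1).toNat ((PySem.List.pyGet? ms (floor + 1)).getD 0 + (PySem.List.pyGet? ms floor).getD 0)
    let ms := ms.set floor.toNat 0
    (ms, steps)) (machines, 0)
  r.2

-- ===== PORT B =====
def solve_alt (data : List (List Int)) : Int :=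
  match data with
  | d0 :: d1 :: d2 :: _ =>
    let m0 := d0.foldl (· + ·) 0 + 4
    let m1 := d1.foldl (· + ·) 0
    let m2 := d2.foldl (· + ·) 0
    2 * (3 * m0 + 2 * m1 + m2) - 9
  | _ => 0

-- ===== PRECONDITION & SPEC =====
-- A writes machines[3] (and reads machines[0..2]), so it raises IndexError on fewer than 4 floors.
def Pre_solve (data : List (List Int)) : Prop := 4 ≤ data.length
instance (data : List (List Int)) : Decidable (Pre_solve data) := by unfold Pre_solve; infer_instance
def pvWitness_solve : List (List Int) := [[1, 2], [0], [3], []]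

def Spec_solve (data : List (List Int)) (out : Int) : Prop := out = solve_alt data
instance (data : List (List Int)) (out : Int) : Decidable (Spec_solve data out) := by unfold Spec_solve; infer_instance

-- ===== CLAIM (what is proved, stated in full; the proofs are below) =====
def Claim_equal_solve : Prop := ∀ (data : List (List Int)), Dom_solve data → Pre_solve data → Spec_solve data (solve data)

-- ===== LEMMAS AND PROOFS =====

-- ===== VERDICT =====
theorem solve_spec : Claim_equal_solve := by
  intro data _hdom hpre
  unfold Pre_solve at hpre
  obtain ⟨d0, d1, d2, d3, rest, rfl⟩ :
      ∃ d0 d1 d2 d3 rest, data = d0 :: d1 :: d2 :: d3 :: rest := by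
    match data with
    | a :: b :: c :: d :: r => exact ⟨a, b, c, d, r, rfl⟩
    | [] | [_] | [_, _] | [_, _, _] => simp at hpre
  unfold Spec_solve solve solve_alt
  simp [PySem.List.pyRange, PySem.List.pyGet?, PySem.List.pyIdx?, List.range_succ]
  split_ifs <;> first | omega | (simp; ring)
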